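-- pv_equiv track=rewrite | github.com/annaoliinyk/SoftServe-Internship_python | anagram/anagram_task.py | check_if_sublist
-- ===== SOURCE A (Python) =====
-- def check_if_sublist(word, candidate):
--     if len(candidate) > len(word) or word.lower() == candidate.lower():
--         return False
--     else:
--         candidate_as_letters_list = list(candidate.lower())
--         for letter in word.lower():
--             if letter in candidate_as_letters_list:
--                 candidate_as_letters_list.remove(letter)
--             else:
--                 return False
--         return True
-- ===== SOURCE B (Python) =====
-- def check_if_sublist(word, candidate):
--     if len(candidate) > len(word) or word.lower() == candidate.lower():
--         return False
--     return sorted(word.lower()) == sorted(candidate.lower())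
-- ===== Notes on version B (the rewrite author's own statement) =====
-- stated objective: faster
-- what changed: Replaces the quadratic scan-and-remove loop by a single sorted-letters comparison: because the guard forces len(candidate) <= len(word), the loop succeeds exactly when the lowercased letters are anagrams, i.e. sorted(word.lower()) == sorted(candidate.lower()).
import Mathlib
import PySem

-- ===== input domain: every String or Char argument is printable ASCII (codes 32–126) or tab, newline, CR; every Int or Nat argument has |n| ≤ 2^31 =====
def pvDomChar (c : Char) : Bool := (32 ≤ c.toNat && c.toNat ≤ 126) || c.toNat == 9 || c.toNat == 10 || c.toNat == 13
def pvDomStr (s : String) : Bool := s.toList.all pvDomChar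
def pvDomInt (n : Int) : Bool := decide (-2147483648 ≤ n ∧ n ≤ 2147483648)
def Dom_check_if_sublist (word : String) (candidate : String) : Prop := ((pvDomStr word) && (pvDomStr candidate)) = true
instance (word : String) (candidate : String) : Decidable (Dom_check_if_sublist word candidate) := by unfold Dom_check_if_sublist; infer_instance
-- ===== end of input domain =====

-- B replaces A's quadratic scan-and-remove loop with a sorted-letters comparison
-- (valid because the length guard forces the sub-multiset check to be an anagram check): simpler.


-- ===== PORT A =====
-- the for-loop over word.lower(): membership test, then list.remove (first occurrence)
def pvLoopA : List Char → List Char → Bool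
  | [], _ => true
  | l :: ls, cs =>
    if l ∈ cs then pvLoopA ls ((PySem.List.remove? cs l).getD [])
    else false

def check_if_sublist (word : String) (candidate : String) : Bool :=
  if PySem.Str.len word < PySem.Str.len candidate
      || PySem.Str.lower word == PySem.Str.lower candidate then false
  else pvLoopA (PySem.Str.lower word).toList (PySem.Str.lower candidate).toList

-- ===== PORT B =====
def check_if_sublist_alt (word : String) (candidate : String) : Bool :=
  if PySem.Str.len word < PySem.Str.len candidate
      || PySem.Str.lower word == PySem.Str.lower candidate then false
  else (PySem.List.sorted (PySem.Str.lower word).toList (fun x => x) false)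
        == (PySem.List.sorted (PySem.Str.lower candidate).toList (fun x => x) false)

-- ===== PRECONDITION & SPEC =====
def Spec_check_if_sublist (word : String) (candidate : String) (out : Bool) : Prop := out = check_if_sublist_alt word candidate
instance (word : String) (candidate : String) (out : Bool) : Decidable (Spec_check_if_sublist word candidate out) := by unfold Spec_check_if_sublist; infer_instance

-- ===== CLAIM (what is proved, stated in full; the proofs are below) =====
def Claim_equal_check_if_sublist : Prop := ∀ (word : String) (candidate : String), Dom_check_if_sublist word candidate → Spec_check_if_sublist word candidate (check_if_sublist word candidate)

-- ===== LEMMAS AND PROOFS =====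

-- A's loop succeeds exactly when w is a sub-permutation (sub-multiset) of c.
theorem pvLoopA_eq_true_iff (w c : List Char) : pvLoopA w c = true ↔ List.Subperm w c := by
  induction w generalizing c with
  | nil => simp [pvLoopA, List.nil_subperm]
  | cons l ls ih =>
    simp only [pvLoopA]
    by_cases hm : l ∈ c
    · rw [if_pos hm, PySem.List.remove?_eq_some_erase c l hm]
      simp only [Option.getD_some, ih]
      constructor
      · intro h
        exact ((List.subperm_cons l).mpr h).trans (List.perm_cons_erase hm).symm.subperm
      · intro h
        have h1 : List.Subperm ((l :: ls).erase l) (c.erase l) := h.erase l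
        simpa [List.erase_cons_head] using h1
    · rw [if_neg hm]
      refine iff_of_false (by simp) ?_
      intro h
      exact hm (h.subset (List.mem_cons_self))

theorem pvLoopA_eq_sorted (w c : List Char) (hlen : c.length ≤ w.length) :
    pvLoopA w c = ((PySem.List.sorted w (fun x => x) false) == (PySem.List.sorted c (fun x => x) false)) := by
  rcases h : pvLoopA w c with _ | _
  · rcases hs : ((PySem.List.sorted w (fun x => x) false) == (PySem.List.sorted c (fun x => x) false)) with _ | _
    · rfl
    · exfalso
      have hperm : w.Perm c := (PySem.List.sorted_id_eq_sorted_id_iff_perm w c).mp (by simpa using hs)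
      have : pvLoopA w c = true := (pvLoopA_eq_true_iff w c).mpr hperm.subperm
      simp [h] at this
  · have hsub : List.Subperm w c := (pvLoopA_eq_true_iff w c).mp h
    have hperm : w.Perm c := hsub.perm_of_length_le hlen
    have heq := (PySem.List.sorted_id_eq_sorted_id_iff_perm w c).mpr hperm
    exact (beq_iff_eq.mpr heq).symm

-- ===== VERDICT (by name: the statement is the Claim_ definition above) =====
theorem check_if_sublist_spec : Claim_equal_check_if_sublist := by
  intro word candidate _
  unfold Spec_check_if_sublist check_if_sublist check_if_sublist_alt
  by_cases hg : (PySem.Str.len word < PySem.Str.len candidate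
      || PySem.Str.lower word == PySem.Str.lower candidate) = true
  · rw [if_pos hg, if_pos hg]
  · rw [if_neg hg, if_neg hg]
    apply pvLoopA_eq_sorted
    simp only [Bool.or_eq_true, decide_eq_true_eq, not_or] at hg
    have hlt := hg.1
    have := PySem.Str.len_eq word
    have := PySem.Str.len_eq candidate
    simp only [PySem.Str.toList_lower, PySem.Chars.lower, List.length_map]
    omega
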